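-- pv_equiv track=rewrite | github.com/muhammad-amhan/transposition-cipher | scripts/transposition_cipher_tool.py | insert_cipher_into_grid
-- ===== SOURCE A (Python) =====
-- from typing import List, Tuple
--
-- def insert_cipher_into_grid(grid: List[List[str]], order_of_columns: List[int], number_of_rows: int, cipher_text: str, keyword: str) -> List[List[str]]:
--     current_column = 0
--     cipher_letter_index = 0
--
--     for i in range(len(cipher_text)):
--         # reset column to start again from first column since this row is now filled
--         if current_column == len(keyword):
--             current_column = 0
--
--         column = order_of_columns[current_column]
--         for row in range(number_of_rows):
--             if cipher_letter_index == len(cipher_text):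
--                 break
--
--             grid[row][column] = cipher_text[cipher_letter_index]
--             cipher_letter_index += 1
--
--         if cipher_letter_index == len(cipher_text):
--             break
--
--         current_column += 1
--
--     return grid
-- ===== SOURCE B (Python) =====
-- # B: one flat pass computing each letter's destination by arithmetic
-- # (row = k % rows, column slot = k // rows, wrapped by len(keyword)),
-- # replacing A's nested loops with running counters and breaks.
-- # With no rows to fill there is nothing to place, so the grid is returned as is.
-- # Like A, mutates `grid` in place and returns it.
-- def insert_cipher_into_grid(grid, order_of_columns, number_of_rows, cipher_text, keyword):
--     if number_of_rows < 1:
--         return grid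
--     for k in range(len(cipher_text)):
--         row = k % number_of_rows
--         column = order_of_columns[(k // number_of_rows) % len(keyword)]
--         grid[row][column] = cipher_text[k]
--     return grid
-- ===== Notes on version B (the rewrite author's own statement) =====
-- stated objective: simpler
-- what changed: Replaces A's nested loops with running counters, resets and two break statements by a single flat loop over letter positions k, computing each letter's destination arithmetically (row = k % number_of_rows, column slot = (k // number_of_rows) % len(keyword)), with an early return when number_of_rows < 1; both mutate grid in place, and the proved equivalence is about the return value.
-- outside the precondition, e.g. on insert_cipher_into_grid([['x'], ['y']], [0], 2, 'ab', ''): A returns [['a'], ['b']], B raises ZeroDivisionError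
import Mathlib
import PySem

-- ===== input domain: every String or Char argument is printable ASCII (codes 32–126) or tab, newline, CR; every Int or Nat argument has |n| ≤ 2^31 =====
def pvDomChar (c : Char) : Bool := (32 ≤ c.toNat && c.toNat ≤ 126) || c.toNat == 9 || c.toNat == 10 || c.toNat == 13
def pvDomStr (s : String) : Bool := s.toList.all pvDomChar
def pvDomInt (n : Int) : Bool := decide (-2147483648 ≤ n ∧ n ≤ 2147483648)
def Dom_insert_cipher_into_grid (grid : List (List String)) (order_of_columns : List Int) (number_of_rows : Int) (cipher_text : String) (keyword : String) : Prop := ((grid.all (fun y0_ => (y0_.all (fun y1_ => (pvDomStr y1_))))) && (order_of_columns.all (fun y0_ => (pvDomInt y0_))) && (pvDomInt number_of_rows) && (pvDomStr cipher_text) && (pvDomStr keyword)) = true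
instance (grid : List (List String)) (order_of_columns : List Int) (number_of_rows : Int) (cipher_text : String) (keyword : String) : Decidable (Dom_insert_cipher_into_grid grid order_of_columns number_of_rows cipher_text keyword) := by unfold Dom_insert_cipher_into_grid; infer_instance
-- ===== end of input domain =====

-- B replaces A's nested loops/counters/breaks by one flat arithmetic pass (simpler);
-- both Pythons mutate `grid` in place — the equivalence proved here is about the RETURN value.

-- ===== PORT A =====
-- shared cell primitives (both Pythons do `grid[row][column] = cipher_text[k]`):
-- Python cipher_text[i] (a one-character string); always guarded by i < len(cipher_text),
-- so the .getD "" default is never taken on admitted inputs.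
def charAt (ct : String) (i : Int) : String :=
  ((PySem.Str.pyGet? ct i).map (fun c => String.ofList [c])).getD ""

-- Python `g[r][c] = v` (negative indices wrap); IndexError is excluded by Pre_.
def gsetCell (g : List (List String)) (r c : Int) (v : String) : List (List String) :=
  PySem.List.pySetD g r (PySem.List.pySetD (PySem.List.pyGetD g r []) c v)

-- inner `for row in range(number_of_rows)` body; state = (grid, cipher_letter_index);
-- the `break` persists as the idx = len guard (nothing else happens after the break).
def aInnerStep (ct : String) (column : Int)
    (st : List (List String) × Int) (row : Int) : List (List String) × Int :=
  if st.2 = PySem.Str.len ct then st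
  else (gsetCell st.1 row column (charAt ct st.2), st.2 + 1)

-- outer `for i in range(len(cipher_text))` body; state = (grid, current_column, cipher_letter_index, done);
-- `done` models the outer break (once set, remaining iterations do nothing).
def aOuterStep (order : List Int) (rows : Int) (ct kw : String)
    (st : List (List String) × Int × Int × Bool) (_i : Int) :
    List (List String) × Int × Int × Bool :=
  match st with
  | (g, cur, idx, done) =>
    if done then (g, cur, idx, done)
    else
      let cur' := if cur = PySem.Str.len kw then 0 else cur
      let column := PySem.List.pyGetD order cur' 0   -- order_of_columns[current_column]; in range under Pre_
      let p := (PySem.List.pyRange 0 rows 1).foldl (aInnerStep ct column) (g, idx)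
      if p.2 = PySem.Str.len ct then (p.1, cur', p.2, true)
      else (p.1, cur' + 1, p.2, false)

def insert_cipher_into_grid (grid : List (List String)) (order_of_columns : List Int) (number_of_rows : Int) (cipher_text : String) (keyword : String) : List (List String) :=
  ((PySem.List.pyRange 0 (PySem.Str.len cipher_text) 1).foldl
    (aOuterStep order_of_columns number_of_rows cipher_text keyword)
    (grid, 0, 0, false)).1

-- ===== PORT B =====
-- body of B's single flat loop over k
def bStep (order : List Int) (rows : Int) (ct kw : String)
    (g : List (List String)) (k : Int) : List (List String) :=
  gsetCell g (PySem.Int.mod k rows)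
    (PySem.List.pyGetD order
      (PySem.Int.mod (PySem.Int.floordiv k rows) (PySem.Str.len kw)) 0)
    (charAt ct k)

def insert_cipher_into_grid_alt (grid : List (List String)) (order_of_columns : List Int) (number_of_rows : Int) (cipher_text : String) (keyword : String) : List (List String) :=
  if number_of_rows < 1 then grid
  else
    (PySem.List.pyRange 0 (PySem.Str.len cipher_text) 1).foldl
      (bStep order_of_columns number_of_rows cipher_text keyword) grid

-- ===== PRECONDITION & SPEC =====
-- Pre_ excludes, for nonempty cipher_text: an empty keyword with number_of_rows >= 1 (B's modulo
-- arithmetic raises ZeroDivisionError where A overwrite-fills one column / returns the grid), and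
-- grids/order lists too short or with out-of-range column indices for the cells Python touches
-- (A raises IndexError); the column check is conservative: each used order entry must be valid for
-- every touched row, although the last used column touches fewer rows.
def Pre_insert_cipher_into_grid (grid : List (List String)) (order_of_columns : List Int) (number_of_rows : Int) (cipher_text : String) (keyword : String) : Prop :=
  cipher_text.toList = [] ∨
  (number_of_rows < 1 ∧
    ((1 ≤ PySem.Str.len keyword ∧
      min (PySem.Str.len cipher_text) (PySem.Str.len keyword) ≤ (order_of_columns.length : Int)) ∨
     (PySem.Str.len keyword = 0 ∧
      PySem.Str.len cipher_text ≤ (order_of_columns.length : Int)))) ∨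
  (1 ≤ number_of_rows ∧ 1 ≤ PySem.Str.len keyword ∧
   min number_of_rows (PySem.Str.len cipher_text) ≤ (grid.length : Int) ∧
   (PySem.Str.len keyword ≤ (order_of_columns.length : Int) ∨
    PySem.Str.len cipher_text ≤ (order_of_columns.length : Int) * number_of_rows) ∧
   -- order entry at position i is used iff i < len(keyword) and i*number_of_rows < len(cipher_text)
   ∀ p ∈ order_of_columns.zipIdx,
     (p.2 : Int) < PySem.Str.len keyword →
     (p.2 : Int) * number_of_rows < PySem.Str.len cipher_text →
     ∀ r ∈ grid.take (min number_of_rows (PySem.Str.len cipher_text)).toNat,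
       PySem.Raise.InRange r.length p.1)
instance (grid : List (List String)) (order_of_columns : List Int) (number_of_rows : Int) (cipher_text : String) (keyword : String) : Decidable (Pre_insert_cipher_into_grid grid order_of_columns number_of_rows cipher_text keyword) := by unfold Pre_insert_cipher_into_grid; infer_instance

def pvWitness_insert_cipher_into_grid : List (List String) × List Int × Int × String × String :=
  ([["", ""], ["", ""]], [1, 0], 2, "abcd", "km")

def Spec_insert_cipher_into_grid (grid : List (List String)) (order_of_columns : List Int) (number_of_rows : Int) (cipher_text : String) (keyword : String) (out : List (List String)) : Prop := out = insert_cipher_into_grid_alt grid order_of_columns number_of_rows cipher_text keyword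
instance (grid : List (List String)) (order_of_columns : List Int) (number_of_rows : Int) (cipher_text : String) (keyword : String) (out : List (List String)) : Decidable (Spec_insert_cipher_into_grid grid order_of_columns number_of_rows cipher_text keyword out) := by unfold Spec_insert_cipher_into_grid; infer_instance

-- ===== CLAIM (what is proved, stated in full; the proofs are below) =====
def Claim_equal_insert_cipher_into_grid : Prop := ∀ (grid : List (List String)) (order_of_columns : List Int) (number_of_rows : Int) (cipher_text : String) (keyword : String), Dom_insert_cipher_into_grid grid order_of_columns number_of_rows cipher_text keyword → Pre_insert_cipher_into_grid grid order_of_columns number_of_rows cipher_text keyword → Spec_insert_cipher_into_grid grid order_of_columns number_of_rows cipher_text keyword (insert_cipher_into_grid grid order_of_columns number_of_rows cipher_text keyword)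

-- ===== LEMMAS AND PROOFS =====

-- once the outer break has fired, the remaining outer iterations do nothing
theorem aOuter_done (order : List Int) (rows : Int) (ct kw : String) (l : List Int)
    (g : List (List String)) (cur idx : Int) :
    l.foldl (aOuterStep order rows ct kw) (g, cur, idx, true) = (g, cur, idx, true) := by
  induction l with
  | nil => rfl
  | cons x l ih => simpa [aOuterStep] using ih

-- pyRange splits at an intermediate point
theorem pyRange_one_split (a b c : Int) (hab : a ≤ b) (hbc : b ≤ c) :
    PySem.List.pyRange a c 1 = PySem.List.pyRange a b 1 ++ PySem.List.pyRange b c 1 := by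
  rw [PySem.List.pyRange_one, PySem.List.pyRange_one, PySem.List.pyRange_one]
  have h : (c - a).toNat = (b - a).toNat + (c - b).toNat := by omega
  rw [h, List.range_add, List.map_append, List.map_map]
  congr 1
  apply List.map_congr_left
  intro k _
  simp only [Function.comp_apply]
  omega

-- Python floor-division facts inside one chunk of R letters
theorem chunk_arith (j k R : Int) (hR : 0 < R) (h1 : j * R ≤ k) (h2 : k < j * R + R) :
    PySem.Int.floordiv k R = j ∧ PySem.Int.mod k R = k - j * R := by
  have hd : PySem.Int.floordiv k R = j := by
    rw [PySem.Int.floordiv_eq_iff_of_pos hR]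
    constructor <;> nlinarith
  refine ⟨hd, ?_⟩
  have := PySem.Int.floordiv_mul_add_mod k R
  rw [hd] at this
  omega

-- the reset-then-increment of current_column is the successor modulo len(keyword)
theorem modstep (j L : Int) (hL : 0 < L) :
    (if PySem.Int.mod j L + 1 = L then 0 else PySem.Int.mod j L + 1)
      = PySem.Int.mod (j + 1) L := by
  rw [PySem.Int.mod_eq_emod_of_pos hL, PySem.Int.mod_eq_emod_of_pos hL]
  have h0 : 0 ≤ j % L := Int.emod_nonneg j (by omega)
  have h1 : j % L < L := Int.emod_lt_of_pos j hL
  have key : (j + 1) % L = (j % L + 1) % L := by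
    conv_lhs => rw [show j + 1 = (j % L + 1) + L * (j / L) by
      have := Int.mul_ediv_add_emod j L; omega]
    rw [Int.add_mul_emod_self_left]
  rw [key]
  by_cases hc : j % L + 1 = L
  · rw [if_pos hc, hc, Int.emod_self]
  · rw [if_neg hc]
    exact (Int.emod_eq_of_lt (by omega) (by omega)).symm

-- the inner row loop, flattened: starting at letter index a it writes letters
-- a, a+1, … up to min(a+m, n)-1 into successive rows r0, r0+1, …
theorem innerLem (ct : String) (col : Int) (m : Nat) :
    ∀ (r0 a : Int) (g : List (List String)), 0 ≤ a → a ≤ PySem.Str.len ct →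
    (PySem.List.pyRange r0 (r0 + (m : Int)) 1).foldl (aInnerStep ct col) (g, a) =
      ((PySem.List.pyRange a (min (a + (m : Int)) (PySem.Str.len ct)) 1).foldl
        (fun g k => gsetCell g (r0 + (k - a)) col (charAt ct k)) g,
       min (a + (m : Int)) (PySem.Str.len ct)) := by
  induction m with
  | zero =>
    intro r0 a g _ han
    have hmin : min (a + ((0:Nat):Int)) (PySem.Str.len ct) = a := by
      push_cast; omega
    rw [hmin, PySem.List.pyRange_one_eq_nil (by push_cast; omega),
      PySem.List.pyRange_one_eq_nil (le_refl a)]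
    rfl
  | succ m ih =>
    intro r0 a g ha han
    have hcons : PySem.List.pyRange r0 (r0 + ((m:Int)+1)) 1
        = r0 :: PySem.List.pyRange (r0+1) ((r0+1) + (m:Int)) 1 := by
      rw [PySem.List.pyRange_one_cons (by omega)]
      congr 1; ring_nf
    push_cast
    rw [hcons, List.foldl_cons]
    by_cases hend : a = PySem.Str.len ct
    · have hstep : aInnerStep ct col (g, a) r0 = (g, a) := by
        dsimp only [aInnerStep]
        rw [if_pos hend]
      rw [hstep, ih (r0+1) a g ha han]
      have hm1 : min (a + (m:Int)) (PySem.Str.len ct) = PySem.Str.len ct := by omega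
      have hm2 : min (a + ((m:Int)+1)) (PySem.Str.len ct) = PySem.Str.len ct := by omega
      rw [hm1, hm2, hend]
      simp
    · have hlt : a < PySem.Str.len ct := lt_of_le_of_ne han hend
      have hstep : aInnerStep ct col (g, a) r0
          = (gsetCell g r0 col (charAt ct a), a + 1) := by
        dsimp only [aInnerStep]
        rw [if_neg hend]
      rw [hstep, ih (r0+1) (a+1) _ (by omega) (by omega)]
      have hmineq : min ((a+1) + (m:Int)) (PySem.Str.len ct)
          = min (a + ((m:Int)+1)) (PySem.Str.len ct) := by omega
      rw [hmineq]
      have hacons : PySem.List.pyRange a (min (a + ((m:Int)+1)) (PySem.Str.len ct)) 1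
          = a :: PySem.List.pyRange (a+1) (min (a + ((m:Int)+1)) (PySem.Str.len ct)) 1 := by
        rw [PySem.List.pyRange_one_cons (by omega)]
      rw [hacons, List.foldl_cons]
      have hfn : (fun (g : List (List String)) (k : Int) =>
            gsetCell g ((r0+1) + (k - (a+1))) col (charAt ct k))
          = (fun g k => gsetCell g (r0 + (k - a)) col (charAt ct k)) := by
        funext g k; congr 1; ring
      rw [hfn]
      congr 2
      simp

-- main outer-loop invariant: after j complete columns the grids agree and the rest
-- of A's run writes exactly B's flat writes on [j*R, n)
theorem outer_inv (order : List Int) (R : Int) (ct kw : String)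
    (hR : 0 < R) (hL : 0 < PySem.Str.len kw) :
    ∀ (t : Nat) (l : List Int), l.length = t → ∀ (j : Int) (g : List (List String)) (cur : Int),
    0 ≤ j →
    (if cur = PySem.Str.len kw then 0 else cur) = PySem.Int.mod j (PySem.Str.len kw) →
    j * R < PySem.Str.len ct →
    PySem.Str.len ct ≤ j * R + (t : Int) * R →
    (l.foldl (aOuterStep order R ct kw) (g, cur, j * R, false)).1
      = (PySem.List.pyRange (j * R) (PySem.Str.len ct) 1).foldl (bStep order R ct kw) g := by
  intro t
  induction t with
  | zero =>
    intro l hl j g cur hj hcur hlt hle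
    exfalso; push_cast at hle; omega
  | succ t ih =>
    intro l hl j g cur hj hcur hlt hle
    match l with
    | x :: l' =>
      simp only [List.length_cons] at hl
      have hl' : l'.length = t := by omega
      rw [List.foldl_cons]
      have hRt : ((R.toNat : Int)) = R := Int.toNat_of_nonneg (by omega)
      have hrange : PySem.List.pyRange 0 R 1 = PySem.List.pyRange 0 (0 + (R.toNat : Int)) 1 := by
        rw [hRt]; ring_nf
      have hinner := innerLem ct (PySem.List.pyGetD order (PySem.Int.mod j (PySem.Str.len kw)) 0)
        R.toNat 0 (j * R) g (by positivity) (le_of_lt hlt)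
      have hstep : aOuterStep order R ct kw (g, cur, j * R, false) x
          = (let p := (PySem.List.pyRange 0 R 1).foldl
               (aInnerStep ct (PySem.List.pyGetD order (PySem.Int.mod j (PySem.Str.len kw)) 0)) (g, j * R);
             if p.2 = PySem.Str.len ct then (p.1, PySem.Int.mod j (PySem.Str.len kw), p.2, true)
             else (p.1, PySem.Int.mod j (PySem.Str.len kw) + 1, p.2, false)) := by
        simp only [aOuterStep, if_neg (by simp : ¬ (false = true))]
        rw [hcur]
      rw [hstep]
      simp only [hrange]
      rw [hinner, hRt]
      set col := PySem.List.pyGetD order (PySem.Int.mod j (PySem.Str.len kw)) 0 with hcol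
      set n := PySem.Str.len ct with hn
      -- the chunk functions agree on [j*R, min(j*R+R, n))
      have hchunk : ∀ (b : Int), b ≤ j * R + R →
          (PySem.List.pyRange (j*R) b 1).foldl
            (fun g k => gsetCell g (0 + (k - j*R)) col (charAt ct k)) g
          = (PySem.List.pyRange (j*R) b 1).foldl (bStep order R ct kw) g := by
        intro b hb
        apply PySem.List.foldl_congr_mem
        intro acc k hk
        rw [PySem.List.mem_pyRange_one] at hk
        obtain ⟨harith1, harith2⟩ := chunk_arith j k R hR hk.1 (by omega)
        simp only [bStep, harith1, harith2, hcol]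
        congr 1
        omega
      by_cases hfin : min (j * R + R) n = n
      · rw [if_pos hfin, aOuter_done]
        dsimp only
        rw [hfin]
        exact hchunk n (by omega)
      · rw [if_neg hfin]
        have hmin : min (j * R + R) n = j * R + R := by omega
        rw [hmin]
        dsimp only
        have hlt' : j * R + R < n := by omega
        have hjr : j * R + R = (j + 1) * R := by ring
        have hrec := ih l' hl' (j + 1) ((PySem.List.pyRange (j*R) (j*R+R) 1).foldl
            (fun g k => gsetCell g (0 + (k - j*R)) col (charAt ct k)) g)
            (PySem.Int.mod j (PySem.Str.len kw) + 1) (by omega)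
            (modstep j (PySem.Str.len kw) hL)
            (by rw [← hjr]; exact hlt')
            (by push_cast at hle ⊢; nlinarith)
        rw [← hjr] at hrec
        rw [hrec, hchunk (j*R+R) (by omega),
          pyRange_one_split (j*R) (j*R+R) n (by omega) (by omega), List.foldl_append]

-- with number_of_rows < 1 the inner row loop is empty: A only cycles current_column and
-- returns the grid unchanged
theorem aOuter_norows (order : List Int) (R : Int) (ct kw : String) (hR : R < 1) :
    ∀ (l : List Int) (g : List (List String)) (cur : Int),
    (l.foldl (aOuterStep order R ct kw) (g, cur, 0, false)).1 = g := by
  intro l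
  induction l with
  | nil => intro g cur; rfl
  | cons x l ih =>
    intro g cur
    rw [List.foldl_cons]
    have hnil : PySem.List.pyRange 0 R 1 = [] :=
      PySem.List.pyRange_one_eq_nil (by omega)
    have hstep : aOuterStep order R ct kw (g, cur, 0, false) x
        = if (0:Int) = PySem.Str.len ct
          then (g, (if cur = PySem.Str.len kw then 0 else cur), 0, true)
          else (g, (if cur = PySem.Str.len kw then 0 else cur) + 1, 0, false) := by
      simp only [aOuterStep, hnil, List.foldl_nil]
      rfl
    rw [hstep]
    split
    · rw [aOuter_done]
    · exact ih g _

-- ===== VERDICT (by name: the statement is the Claim_ definition above) =====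
theorem insert_cipher_into_grid_spec : Claim_equal_insert_cipher_into_grid := by
  intro grid order R ct kw _hdom hpre
  unfold Spec_insert_cipher_into_grid
  unfold insert_cipher_into_grid insert_cipher_into_grid_alt
  have hn0 : 0 ≤ PySem.Str.len ct := by
    simp [PySem.Str.len_eq]
  rcases hpre with hemp | ⟨hR, _⟩ | ⟨hR, hL, _, _, _⟩
  · have hz : PySem.Str.len ct = 0 := by
      simp [PySem.Str.len_eq, hemp]
    rw [hz, PySem.List.pyRange_one_eq_nil (by omega)]
    split <;> rfl
  · rw [if_pos hR]
    exact aOuter_norows order R ct kw hR _ grid 0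
  · rw [if_neg (by omega)]
    by_cases hz : PySem.Str.len ct = 0
    · rw [hz, PySem.List.pyRange_one_eq_nil (by omega)]
      rfl
    · have hnpos : 0 < PySem.Str.len ct := by omega
      have hlen : (PySem.List.pyRange 0 (PySem.Str.len ct) 1).length
          = (PySem.Str.len ct).toNat := by
        simp [PySem.List.length_pyRange_one]
      have := outer_inv order R ct kw (by omega) (by omega)
        (PySem.Str.len ct).toNat (PySem.List.pyRange 0 (PySem.Str.len ct) 1) hlen
        0 grid 0 le_rfl
        (by
          have : PySem.Int.mod 0 (PySem.Str.len kw) = 0 := by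
            rw [PySem.Int.mod_eq_emod_of_pos (by omega)]; simp
          rw [this]; split <;> rfl)
        (by simpa using hnpos)
        (by
          have ht : ((PySem.Str.len ct).toNat : Int) = PySem.Str.len ct :=
            Int.toNat_of_nonneg hn0
          rw [ht]; nlinarith)
      simpa using this
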